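-- pv_equiv track=rewrite | github.com/alyssating/CS101-APTs | APT6/SortedFreqs.py | freqs
-- ===== SOURCE A (Python) =====
-- def freqs(data):
--     """
--     return list of int values corresponding
--     to frequencies of strings in data, a list
--     of strings
--     """
--
--     dict = {}
--     for fruit in data:
--         if fruit not in dict.keys():
--             dict[fruit] = 1
--         else:
--             dict[fruit] += 1
--     lst = list(dict.items())
--     lst.sort()
--     ret = []
--     for i in lst:
--         ret.append(i[-1])
--     return ret
-- ===== SOURCE B (Python) =====
-- def freqs(data):
--     """
--     return list of int values corresponding
--     to frequencies of strings in data, a list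
--     of strings
--     """
--     ret = []
--     prev = None
--     count = 0
--     for s in sorted(data):
--         if count and s == prev:
--             count += 1
--         else:
--             if count:
--                 ret.append(count)
--             prev = s
--             count = 1
--     if count:
--         ret.append(count)
--     return ret
-- ===== Notes on version B (the rewrite author's own statement) =====
-- stated objective: alternative
-- what changed: B builds no dictionary at all: it sorts the input once and emits the length of each run of consecutive equal strings in a single pass, instead of counting into a dict and then sorting its items.
import Mathlib
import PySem

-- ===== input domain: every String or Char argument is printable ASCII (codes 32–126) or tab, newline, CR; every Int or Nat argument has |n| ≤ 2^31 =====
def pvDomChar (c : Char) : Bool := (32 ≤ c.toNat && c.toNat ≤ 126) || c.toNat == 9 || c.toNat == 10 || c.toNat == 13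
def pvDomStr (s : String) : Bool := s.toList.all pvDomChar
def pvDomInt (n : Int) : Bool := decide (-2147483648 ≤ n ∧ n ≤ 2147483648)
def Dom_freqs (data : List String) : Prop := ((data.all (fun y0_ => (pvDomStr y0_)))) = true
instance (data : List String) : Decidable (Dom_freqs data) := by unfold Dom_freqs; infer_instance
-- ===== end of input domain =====

-- B replaces A's count-into-a-dict-then-sort-items algorithm by a single run-length pass over the sorted input (alternative decomposition, same asymptotic cost).

-- ===== PORT A =====
def freqs (data : List String) : List Int :=
  let d := data.foldl
    (fun (d : PySem.Dict String Int) fruit =>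
      if ¬ d.contains fruit then d.insert fruit 1
      else d.insert fruit (d.getD fruit 0 + 1))
    PySem.Dict.empty
  let lst := PySem.List.sorted2 d.items (fun i => i.1) (fun i => i.2) false
  lst.foldl (fun ret i => ret ++ [i.2]) []

-- ===== PORT B =====
def freqs_alt (data : List String) : List Int :=
  let st := (PySem.List.sorted data (fun x => x) false).foldl
    (fun (st : List Int × Option String × Int) s =>
      if st.2.2 ≠ 0 ∧ st.2.1 = some s then (st.1, st.2.1, st.2.2 + 1)
      else ((if st.2.2 ≠ 0 then st.1 ++ [st.2.2] else st.1), some s, 1))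
    ([], none, 0)
  if st.2.2 ≠ 0 then st.1 ++ [st.2.2] else st.1

-- ===== PRECONDITION & SPEC =====
def Spec_freqs (data : List String) (out : List Int) : Prop := out = freqs_alt data
instance (data : List String) (out : List Int) : Decidable (Spec_freqs data out) := by unfold Spec_freqs; infer_instance

-- ===== CLAIM (what is proved, stated in full; the proofs are below) =====
def Claim_equal_freqs : Prop := ∀ (data : List String), Dom_freqs data → Spec_freqs data (freqs data)

-- ===== LEMMAS AND PROOFS =====

-- accumulating strings into a PySem.Set, relative to an arbitrary starting set
theorem foldl_set_add_eq (u : List String) : ∀ (s : List String),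
    u.foldl PySem.Set.add s = s ++ (PySem.Set.ofList u).filter (fun z => decide (z ∉ s)) := by
  induction u with
  | nil => intro s; simp [PySem.Set.ofList, PySem.Set.empty]
  | cons y u ih =>
    intro s
    have hof : PySem.Set.ofList (y :: u) = u.foldl PySem.Set.add [y] := rfl
    rw [List.foldl_cons, hof, ih ([y] : List String)]
    by_cases hy : y ∈ s
    · rw [PySem.Set.add_of_mem hy, ih s, List.filter_append, List.filter_filter]
      have h1 : List.filter (fun z => decide (z ∉ s)) [y] = [] := by simp [hy]
      rw [h1, List.nil_append]
      refine congrArg (s ++ ·) (List.filter_congr ?_)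
      intro z _
      by_cases hz : z = y
      · subst hz; simp [hy]
      · simp [hz]
    · rw [PySem.Set.add_of_not_mem hy, ih (s ++ [y]), List.filter_append, List.filter_filter,
        List.append_assoc]
      have h1 : List.filter (fun z => decide (z ∉ s)) [y] = [y] := by simp [hy]
      rw [h1]
      refine congrArg (s ++ ·) (congrArg ([y] ++ ·) (List.filter_congr ?_))
      intro z _
      by_cases h1 : z ∈ s <;> by_cases h2 : z = y <;> simp [h1, h2, List.mem_append]
    
theorem ofList_cons (x : String) (u : List String) :
    PySem.Set.ofList (x :: u) = x :: (PySem.Set.ofList u).filter (fun z => decide (z ≠ x)) := by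
  have hof : PySem.Set.ofList (x :: u) = u.foldl PySem.Set.add [x] := rfl
  rw [hof, foldl_set_add_eq u ([x] : List String)]
  rw [List.singleton_append]
  refine congrArg (x :: ·) (List.filter_congr ?_)
  intro z _
  simp

theorem pairwise_lt_ofList (s : List String) (h : s.Pairwise (· ≤ ·)) :
    (PySem.Set.ofList s).Pairwise (· < ·) := by
  induction s with
  | nil => simp [PySem.Set.ofList, PySem.Set.empty]
  | cons x t ih =>
    rcases List.pairwise_cons.mp h with ⟨hx, ht⟩
    rw [ofList_cons]
    refine List.pairwise_cons.mpr ⟨?_, List.Pairwise.filter _ (ih ht)⟩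
    intro z hz
    rcases List.mem_filter.mp hz with ⟨hz1, hz2⟩
    have hzt : z ∈ t := (PySem.Set.mem_ofList t z).mp hz1
    have hne : z ≠ x := by simpa using hz2
    exact lt_of_le_of_ne (hx z hzt) (Ne.symm hne)

-- B's loop body and final flush, restated for the proofs
def stepB (st : List Int × Option String × Int) (s : String) : List Int × Option String × Int :=
  if st.2.2 ≠ 0 ∧ st.2.1 = some s then (st.1, st.2.1, st.2.2 + 1)
  else ((if st.2.2 ≠ 0 then st.1 ++ [st.2.2] else st.1), some s, 1)

def flushB (st : List Int × Option String × Int) : List Int :=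
  if st.2.2 ≠ 0 then st.1 ++ [st.2.2] else st.1

-- the run-length loop over a sorted tail t, started inside a run of p of length c
theorem runB (t : List String) : ∀ (ret : List Int) (p : String) (c : Int), 0 < c →
    t.Pairwise (· ≤ ·) → (∀ x ∈ t, p ≤ x) →
    flushB (t.foldl stepB (ret, some p, c)) =
      ret ++ (c + (t.count p : Int)) ::
        ((PySem.Set.ofList t).filter (fun z => decide (z ≠ p))).map (fun k => (t.count k : Int)) := by
  induction t with
  | nil =>
    intro ret p c hc _ _
    have hc0 : c ≠ 0 := by omega
    simp [flushB, hc0, PySem.Set.ofList, PySem.Set.empty]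
  | cons x t ih =>
    intro ret p c hc hpw hp
    rcases List.pairwise_cons.mp hpw with ⟨hx, ht⟩
    rw [List.foldl_cons]
    by_cases hpx : p = x
    · subst hpx
      have hstep : stepB (ret, some p, c) p = (ret, some p, c + 1) := by
        have hc0 : c ≠ 0 := by omega
        simp [stepB, hc0]
      rw [hstep, ih ret p (c + 1) (by omega) ht hx, ofList_cons]
      have hfilt : (p :: (PySem.Set.ofList t).filter (fun z => decide (z ≠ p))).filter
          (fun z => decide (z ≠ p)) = (PySem.Set.ofList t).filter (fun z => decide (z ≠ p)) := by
        simp [List.filter_filter]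
      rw [hfilt]
      have hhead : c + 1 + (t.count p : Int) = c + ((p :: t).count p : Int) := by
        rw [List.count_cons_self]; push_cast; ring
      rw [← hhead]
      refine congrArg (ret ++ ·) (congrArg _ ?_)
      refine (List.map_congr_left ?_).symm
      intro k hk
      have hkp : k ≠ p := by simpa using (List.mem_filter.mp hk).2
      rw [List.count_cons_of_ne (Ne.symm hkp)]
    · have hplx : p < x := lt_of_le_of_ne (hp x (List.mem_cons_self)) hpx
      have hstep : stepB (ret, some p, c) x = (ret ++ [c], some x, 1) := by
        have hcond : ¬ (c ≠ 0 ∧ (some p : Option String) = some x) := by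
          rintro ⟨-, h⟩; exact hpx (Option.some.inj h)
        have hc0 : c ≠ 0 := by omega
        simp [stepB, hc0, hpx]
      rw [hstep, ih (ret ++ [c]) x 1 one_pos ht hx, ofList_cons]
      have hpnot : p ∉ x :: t := by
        intro hmem
        rcases List.mem_cons.mp hmem with h | h
        · exact hpx h
        · exact absurd (hx p h) (not_le.mpr hplx)
      have hcnt0 : ((x :: t).count p : Int) = 0 := by
        rw [List.count_eq_zero.mpr hpnot]; simp
      have hfilt : (x :: (PySem.Set.ofList t).filter (fun z => decide (z ≠ x))).filter
          (fun z => decide (z ≠ p)) = x :: (PySem.Set.ofList t).filter (fun z => decide (z ≠ x)) := by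
        rw [List.filter_eq_self]
        intro a ha
        rcases List.mem_cons.mp ha with h | h
        · subst h; simp [Ne.symm hpx]
        · have hat : a ∈ t := (PySem.Set.mem_ofList t a).mp (List.mem_filter.mp h).1
          have : p < a := lt_of_lt_of_le hplx (hx a hat)
          simp [Ne.symm (ne_of_lt this)]
      rw [hfilt, hcnt0, List.map_cons]
      have hheadc : ((x :: t).count x : Int) = 1 + (t.count x : Int) := by
        rw [List.count_cons_self]; push_cast; ring
      rw [hheadc]
      have hmap : ((PySem.Set.ofList t).filter (fun z => decide (z ≠ x))).map
            (fun k => ((x :: t).count k : Int))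
          = ((PySem.Set.ofList t).filter (fun z => decide (z ≠ x))).map
            (fun k => (t.count k : Int)) := by
        refine List.map_congr_left ?_
        intro k hk
        have hkx : k ≠ x := by simpa using (List.mem_filter.mp hk).2
        rw [List.count_cons_of_ne (Ne.symm hkx)]
      rw [hmap, List.append_assoc]
      simp

theorem freqs_alt_eq (data : List String) :
    freqs_alt data = (PySem.Set.ofList (PySem.List.sorted data (fun x => x) false)).map
      (fun k => ((PySem.List.sorted data (fun x => x) false).count k : Int)) := by
  have hrfl : freqs_alt data
      = flushB ((PySem.List.sorted data (fun x => x) false).foldl stepB ([], none, 0)) := rfl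
  rw [hrfl]
  have hpw := PySem.List.sorted_pairwise data (fun x => x)
  cases hs : PySem.List.sorted data (fun x => x) false with
  | nil => simp [flushB, PySem.Set.ofList, PySem.Set.empty]
  | cons x t =>
    rw [hs] at hpw
    rcases List.pairwise_cons.mp hpw with ⟨hx, ht⟩
    rw [List.foldl_cons]
    have hstep : stepB ([], none, 0) x = ([], some x, 1) := by simp [stepB]
    rw [hstep, runB t [] x 1 one_pos ht hx, ofList_cons, List.nil_append, List.map_cons]
    have hheadc : ((x :: t).count x : Int) = 1 + (t.count x : Int) := by
      rw [List.count_cons_self]; push_cast; ring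
    rw [hheadc]
    have hmap : ((PySem.Set.ofList t).filter (fun z => decide (z ≠ x))).map
          (fun k => ((x :: t).count k : Int))
        = ((PySem.Set.ofList t).filter (fun z => decide (z ≠ x))).map
          (fun k => (t.count k : Int)) := by
      refine List.map_congr_left ?_
      intro k hk
      have hkx : k ≠ x := by simpa using (List.mem_filter.mp hk).2
      rw [List.count_cons_of_ne (Ne.symm hkx)]
    rw [hmap]

theorem freqs_eq (data : List String) :
    freqs data = (PySem.List.sorted (PySem.Set.ofList data) (fun x => x) false).map
      (fun k => (data.count k : Int)) := by
  unfold freqs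
  have hfun : (fun (d : PySem.Dict String Int) fruit =>
        if ¬ d.contains fruit then d.insert fruit 1
        else d.insert fruit (d.getD fruit 0 + 1))
      = fun (d : PySem.Dict String Int) x => d.insert x (d.getD x 0 + 1) := by
    funext d x
    by_cases h : d.contains x
    · simp [h]
    · rw [if_pos (by simp [h]), PySem.Dict.getD_of_not_contains d 0 (by simpa using h)]
      norm_num
  rw [hfun, PySem.Dict.foldl_insert_getD_add_one_eq_counter]
  simp only [PySem.Dict.items_counter]
  have hlex : PySem.List.sorted2
        ((PySem.Set.ofList data).map (fun k => (k, (data.count k : Int))))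
        (fun i => i.1) (fun i => i.2) false
      = PySem.List.sorted
        ((PySem.Set.ofList data).map (fun k => (k, (data.count k : Int))))
        (fun i => toLex (i.1, i.2)) false := by
    simp only [PySem.List.sorted2, PySem.List.sorted]
    have hbef : (fun (a b : String × Int) =>
          decide (a.1 < b.1) || (!decide (b.1 < a.1) && decide (a.2 < b.2)))
        = fun (a b : String × Int) => decide (toLex (a.1, a.2) < toLex (b.1, b.2)) := by
      funext a b
      have hiff : (toLex (a.1, a.2) < toLex (b.1, b.2)) ↔
          (a.1 < b.1 ∨ (¬ b.1 < a.1 ∧ a.2 < b.2)) := by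
        rw [Prod.Lex.lt_iff]
        constructor
        · rintro (h | ⟨h1, h2⟩)
          · exact Or.inl h
          · have h1' : a.1 = b.1 := h1
            have h2' : a.2 < b.2 := h2
            exact Or.inr ⟨by rw [h1']; exact lt_irrefl b.1, h2'⟩
        · rintro (h | ⟨h1, h2⟩)
          · exact Or.inl h
          · rcases lt_trichotomy a.1 b.1 with h' | h' | h'
            · exact Or.inl h'
            · exact Or.inr ⟨h', h2⟩
            · exact absurd h' h1
      have hd : decide (toLex (a.1, a.2) < toLex (b.1, b.2))
          = decide (a.1 < b.1 ∨ ¬ b.1 < a.1 ∧ a.2 < b.2) := decide_eq_decide.mpr hiff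
      rw [hd]
      by_cases h1 : a.1 < b.1 <;> by_cases h2 : b.1 < a.1 <;> by_cases h3 : a.2 < b.2 <;>
        simp [h1, h2, h3]
    simp only [Bool.false_eq_true, if_false]
    simp only [hbef]
  rw [hlex]
  have hsorted : PySem.List.sorted
        ((PySem.Set.ofList data).map (fun k => (k, (data.count k : Int))))
        (fun i => toLex (i.1, i.2)) false
      = (PySem.List.sorted (PySem.Set.ofList data) (fun x => x) false).map
        (fun k => (k, (data.count k : Int))) := by
    apply PySem.List.sorted_eq_of_perm_of_pairwise_lt
    · exact (PySem.List.sorted_perm (PySem.Set.ofList data) (fun x => x) false).map _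
    · refine List.Pairwise.map _ ?_ (PySem.List.sorted_ofList_pairwise_lt data)
      intro a b hab
      exact Prod.Lex.lt_iff.mpr (Or.inl hab)
  rw [hsorted, PySem.List.foldl_append_singleton_eq_map, List.nil_append, List.map_map]
  rfl

-- ===== VERDICT (by name: the statement is the Claim_ definition above) =====
theorem freqs_spec : Claim_equal_freqs := by
  intro data _
  unfold Spec_freqs
  rw [freqs_eq, freqs_alt_eq]
  have hperm : (PySem.List.sorted data (fun x => x) false).Perm data :=
    PySem.List.sorted_perm data (fun x => x) false
  have h1 : PySem.List.sorted (PySem.Set.ofList data) (fun x => x) false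
      = PySem.Set.ofList (PySem.List.sorted data (fun x => x) false) := by
    apply PySem.List.sorted_eq_of_perm_of_pairwise_lt
    · exact (List.perm_ext_iff_of_nodup (PySem.Set.nodup_ofList _) (PySem.Set.nodup_ofList _)).mpr
        (fun a => by simp [PySem.Set.mem_ofList, PySem.List.mem_sorted])
    · exact pairwise_lt_ofList _ (PySem.List.sorted_pairwise data (fun x => x))
  rw [h1]
  refine List.map_congr_left ?_
  intro k _
  rw [(hperm.count_eq k).symm]
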